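-- pv_equiv track=rewrite | github.com/amol179/DSA_Notes_Dump | Code_Force/1000/C. Different Differences/C. Different Differences.py | max_characteristic_arrays
-- ===== SOURCE A (Python) =====
-- def max_characteristic_arrays(t, test_cases):
--     results = []
--     for k, n in test_cases:
--         array = []
--         current = 1
--         increment = 1
--         while len(array) < k:
--             array.append(current)
--             remaining = k - len(array) - 1
--             if current + increment + remaining <= n:
--                 current += increment
--                 increment += 1
--             else:
--                 current += 1
--         results.append(array)
--     return results
-- ===== SOURCE B (Python) =====
-- def max_characteristic_arrays(t, test_cases):
--     results = []
--     for k, n in test_cases: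
--         limit = n - k + 1
--         p = next((i for i in range(k) if 1 + i * (i + 1) // 2 > limit), k)
--         ap = 1 + p * (p + 1) // 2
--         results.append([1 + i * (i + 1) // 2 if i < p else ap + (i - p)
--                        for i in range(k)])
--     return results
-- ===== Notes on version B (the rewrite author's own statement) =====
-- stated objective: alternative
-- what changed: Replaces the stateful greedy while-loop (current/increment state per step) with a closed-form two-segment construction: the pivot p is the first index where 1+i*(i+1)//2 exceeds n-k+1, elements before p are triangular numbers 1+i*(i+1)//2 and from p on they increase by 1.
import Mathlib
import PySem

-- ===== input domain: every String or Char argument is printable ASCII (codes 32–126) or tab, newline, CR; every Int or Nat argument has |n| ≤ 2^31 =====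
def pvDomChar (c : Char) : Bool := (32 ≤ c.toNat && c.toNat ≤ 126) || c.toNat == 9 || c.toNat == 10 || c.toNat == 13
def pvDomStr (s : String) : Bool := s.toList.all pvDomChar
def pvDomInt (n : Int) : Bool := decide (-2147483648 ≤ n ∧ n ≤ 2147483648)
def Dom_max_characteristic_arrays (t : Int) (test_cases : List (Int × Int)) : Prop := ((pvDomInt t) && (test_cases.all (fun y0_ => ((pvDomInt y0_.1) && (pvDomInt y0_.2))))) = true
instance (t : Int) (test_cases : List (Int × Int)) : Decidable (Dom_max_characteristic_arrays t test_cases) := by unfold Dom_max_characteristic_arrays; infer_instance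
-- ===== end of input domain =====

-- B replaces A's stateful greedy while-loop by a closed-form two-segment construction
-- (triangular-number prefix up to a pivot, then steps of 1); same cost, different algorithm.

-- ===== PORT A =====
-- the inner 'while len(array) < k' loop of A, state (array, current, increment)
def pvALoop (k n : Int) : Nat → List Int → Int → Int → List Int
  | 0, array, _, _ => array
  | fuel + 1, array, current, increment =>
    if (array.length : Int) < k then
      let array' := array ++ [current]
      let remaining := k - (array'.length : Int) - 1
      if current + increment + remaining ≤ n then
        pvALoop k n fuel array' (current + increment) (increment + 1)
      else
        pvALoop k n fuel array' (current + 1) increment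
    else array

def max_characteristic_arrays (t : Int) (test_cases : List (Int × Int)) : List (List Int) :=
  test_cases.foldl (fun results kn => results ++ [pvALoop kn.1 kn.2 kn.1.toNat [] 1 1]) []

-- ===== PORT B =====
-- 1 + i*(i+1)//2  (Python floor division)
def pvVal (i : Int) : Int := 1 + PySem.Int.floordiv (i * (i + 1)) 2

-- one test case of B: pivot by first failing index, then the two closed-form segments
def pvBCase (k n : Int) : List Int :=
  let limit := n - k + 1
  -- next((i for i in range(k) if 1 + i*(i+1)//2 > limit), k)
  let p := ((PySem.List.pyRange 0 k 1).find? (fun i => decide (pvVal i > limit))).getD k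
  let ap := pvVal p
  (PySem.List.pyRange 0 k 1).map (fun i => if i < p then pvVal i else ap + (i - p))

def max_characteristic_arrays_alt (t : Int) (test_cases : List (Int × Int)) : List (List Int) :=
  test_cases.foldl (fun results kn => results ++ [pvBCase kn.1 kn.2]) []

-- ===== PRECONDITION & SPEC =====
def Spec_max_characteristic_arrays (t : Int) (test_cases : List (Int × Int)) (out : List (List Int)) : Prop := out = max_characteristic_arrays_alt t test_cases
instance (t : Int) (test_cases : List (Int × Int)) (out : List (List Int)) : Decidable (Spec_max_characteristic_arrays t test_cases out) := by unfold Spec_max_characteristic_arrays; infer_instance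

-- ===== CLAIM (what is proved, stated in full; the proofs are below) =====
def Claim_equal_max_characteristic_arrays : Prop := ∀ (t : Int) (test_cases : List (Int × Int)), Dom_max_characteristic_arrays t test_cases → Spec_max_characteristic_arrays t test_cases (max_characteristic_arrays t test_cases)

-- ===== LEMMAS AND PROOFS =====

-- A's loop with the length bookkeeping abstracted into a Nat fuel (= iterations left)
def pvG (n : Int) : Nat → Int → Int → List Int
  | 0, _, _ => []
  | m + 1, cur, inc =>
      cur :: (if cur + inc + (m : Int) - 1 ≤ n then pvG n m (cur + inc) (inc + 1)
              else pvG n m (cur + 1) inc)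

-- first index i in [j, j+m) with pvVal i > L, else j+m
def pvPfrom (L : Int) : Nat → Int → Int
  | 0, j => j
  | m + 1, j => if pvVal j ≤ L then pvPfrom L m (j + 1) else j

theorem pvVal_succ (j : Int) : pvVal (j + 1) = pvVal j + (j + 1) := by
  simp only [pvVal, PySem.Int.floordiv_eq_ediv_of_pos (by norm_num : (0:Int) < 2)]
  have h : (j + 1) * (j + 1 + 1) = j * (j + 1) + (j + 1) * 2 := by ring
  rw [h, Int.add_mul_ediv_right _ _ (by norm_num : (2:Int) ≠ 0)]
  ring

theorem pvALoop_eq_g (k n : Int) :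
    ∀ (m : Nat) (array : List Int) (cur inc : Int),
      (k - (array.length : Int)).toNat = m →
      pvALoop k n m array cur inc = array ++ pvG n m cur inc := by
  intro m
  induction m with
  | zero => intro array cur inc h; simp [pvALoop, pvG]
  | succ m ih =>
      intro array cur inc h
      have hlt : (array.length : Int) < k := by omega
      have hm : (k - (((array ++ [cur]).length : Nat) : Int)).toNat = m := by
        simp only [List.length_append, List.length_cons, List.length_nil]; omega
      simp only [pvALoop, if_pos hlt, List.length_append, List.length_cons, List.length_nil]
      push_cast
      rw [show k - ((array.length : Int) + 1) - 1 = (m : Int) - 1 from by omega]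
      by_cases hc : cur + inc + ((m : Int) - 1) ≤ n
      · rw [if_pos hc, ih (array ++ [cur]) _ _ hm]
        have h2 : cur + inc + (m : Int) - 1 ≤ n := by omega
        simp [pvG, h2]
      · rw [if_neg hc, ih (array ++ [cur]) _ _ hm]
        have h2 : ¬ (cur + inc + (m : Int) - 1 ≤ n) := by omega
        simp [pvG, h2]

theorem pvG_lin (n : Int) :
    ∀ (m : Nat) (cur inc : Int), ¬ (cur + inc + (m : Int) - 1 ≤ n) →
      pvG n (m + 1) cur inc = (List.range (m + 1)).map (fun (d : Nat) => cur + (d : Int)) := by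
  intro m
  induction m with
  | zero => intro cur inc _; simp [pvG]
  | succ m ih =>
      intro cur inc hc
      have hc2 : ¬ ((cur + 1) + inc + (m : Int) - 1 ≤ n) := by push_cast at hc ⊢; omega
      rw [pvG]
      rw [if_neg (by push_cast at hc ⊢; omega)]
      rw [ih (cur + 1) inc hc2]
      conv_rhs => rw [List.range_succ_eq_map]
      rw [List.map_cons, List.map_map]
      congr 1
      · simp
      · apply List.map_congr_left
        intro d _
        simp only [Function.comp_apply, Nat.succ_eq_add_one]
        push_cast
        ring

theorem pvPfrom_ge (L : Int) : ∀ (m : Nat) (j : Int), j ≤ pvPfrom L m j := by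
  intro m
  induction m with
  | zero => intro j; simp [pvPfrom]
  | succ m ih =>
      intro j
      rw [pvPfrom]
      split_ifs with h
      · have := ih (j + 1); omega
      · omega

theorem pvG_main (n : Int) :
    ∀ (m : Nat) (j : Int),
      pvG n m (pvVal j) (j + 1) =
      (List.range m).map (fun (d : Nat) =>
        if j + (d : Int) < pvPfrom (n - j - (m : Int) + 1) m j then pvVal (j + (d : Int))
        else pvVal (pvPfrom (n - j - (m : Int) + 1) m j) + (j + (d : Int) - pvPfrom (n - j - (m : Int) + 1) m j)) := by
  intro m
  induction m with
  | zero => intro j; simp [pvG]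
  | succ m ih =>
      intro j
      set L : Int := n - j - (m : Int) with hL
      rw [show n - j - ((m + 1 : Nat) : Int) + 1 = L from by push_cast [hL]; ring]
      by_cases hc : pvVal j ≤ L
      · -- still in the triangular (jump) phase
        have hcond : pvVal j + (j + 1) + (m : Int) - 1 ≤ n := by
          simp only [pvVal] at hc ⊢; omega
        rw [pvG, if_pos hcond, ← pvVal_succ j]
        have hstep := ih (j + 1)
        rw [show n - (j + 1) - (m : Int) + 1 = L from by push_cast [hL]; ring] at hstep
        have hp : pvPfrom L (m + 1) j = pvPfrom L m (j + 1) := by rw [pvPfrom, if_pos hc]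
        have hpge : j + 1 ≤ pvPfrom L m (j + 1) := pvPfrom_ge L m (j + 1)
        rw [hstep, hp]
        conv_rhs => rw [List.range_succ_eq_map]
        rw [List.map_cons, List.map_map]
        congr 1
        · rw [if_pos (by push_cast; omega)]
          simp
        · apply List.map_congr_left
          intro d _
          simp only [Function.comp_apply, Nat.succ_eq_add_one]
          rw [show (((d + 1 : Nat)) : Int) = (d : Int) + 1 from by push_cast; ring]
          rw [show j + ((d : Int) + 1) = (j + 1) + (d : Int) from by ring]
      · -- pivot reached: the loop adds 1 from here on
        have hcond : ¬ (pvVal j + (j + 1) + (m : Int) - 1 ≤ n) := by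
          simp only [pvVal] at hc ⊢; omega
        rw [pvG_lin n m (pvVal j) (j + 1) hcond]
        have hp : pvPfrom L (m + 1) j = j := by rw [pvPfrom, if_neg hc]
        rw [hp]
        apply List.map_congr_left
        intro d _
        have hd0 : (0 : Int) ≤ (d : Int) := Int.natCast_nonneg d
        rw [if_neg (by omega)]
        ring

theorem pvFind_pfrom (L : Int) :
    ∀ (m : Nat) (j : Int),
      ((PySem.List.pyRange j (j + (m : Int)) 1).find? (fun i => decide (pvVal i > L))).getD (j + (m : Int)) = pvPfrom L m j := by
  intro m
  induction m with
  | zero =>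
      intro j
      rw [PySem.List.pyRange_one_eq_nil (by omega)]
      simp [pvPfrom]
  | succ m ih =>
      intro j
      rw [PySem.List.pyRange_one_cons (by push_cast; omega)]
      rw [List.find?_cons]
      by_cases hc : pvVal j ≤ L
      · have hb : (decide (pvVal j > L)) = false := decide_eq_false (by omega)
        simp only [hb]
        rw [show j + ((m + 1 : Nat) : Int) = (j + 1) + (m : Int) from by push_cast; ring]
        rw [ih (j + 1), pvPfrom, if_pos hc]
      · have hb : (decide (pvVal j > L)) = true := decide_eq_true (by omega)
        simp only [hb]
        rw [pvPfrom, if_neg hc]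
        rfl

theorem pvCase_eq (k n : Int) : pvALoop k n k.toNat [] 1 1 = pvBCase k n := by
  rw [pvALoop_eq_g k n k.toNat [] 1 1 (by simp)]
  simp only [pvBCase]
  by_cases hk : k ≤ 0
  · have h0 : k.toNat = 0 := by omega
    rw [h0, PySem.List.pyRange_one_eq_nil hk]
    simp [pvG]
  · set m : Nat := k.toNat with hm
    have hkm : k = (m : Int) := by omega
    have hstart : pvG n m 1 1 = pvG n m (pvVal 0) (0 + 1) := by
      have h0 : pvVal 0 = 1 := by decide
      rw [h0]; norm_num
    rw [List.nil_append, hstart, pvG_main n m 0]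
    have hfind : ((PySem.List.pyRange 0 k 1).find? (fun i => decide (pvVal i > n - k + 1))).getD k
        = pvPfrom (n - 0 - (m : Int) + 1) m 0 := by
      have h := pvFind_pfrom (n - 0 - (m : Int) + 1) m 0
      rw [zero_add] at h
      rw [show n - k + 1 = n - 0 - (m : Int) + 1 from by omega, hkm]
      exact h
    rw [hfind, hkm]
    rw [PySem.List.pyRange_one 0 (m : Int)]
    rw [show (((m : Int) - 0).toNat) = m from by omega]
    rw [List.map_map]
    apply List.map_congr_left
    intro d _
    simp only [Function.comp_apply, zero_add]

-- ===== VERDICT (by name: the statement is the Claim_ definition above) =====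
theorem max_characteristic_arrays_spec : Claim_equal_max_characteristic_arrays := by
  intro t tcs _
  unfold Spec_max_characteristic_arrays max_characteristic_arrays max_characteristic_arrays_alt
  rw [PySem.List.foldl_append_singleton_eq_map, PySem.List.foldl_append_singleton_eq_map]
  simp only [List.nil_append]
  apply List.map_congr_left
  intro kn _
  exact pvCase_eq kn.1 kn.2
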